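-- pv_equiv track=rewrite | github.com/Yunoya18/PSCP | Mock/Palindrome.py | check_time
-- ===== SOURCE A (Python) =====
-- def check_time(hour, small_value):
--     """check time"""
--     if int(small_value[0]) >= 6:
--         hour = str(int(hour) + 1)
--         small_value = hour[::-1]
--     if hour == "24":
--         hour = "0"
--         small_value = hour[::-1]
--     if int(small_value) >= 60:
--         hour, small_value = check_time(hour, small_value)
--     return hour, small_value
-- ===== SOURCE B (Python) =====
-- def check_time(hour, small_value):
--     """check time (integer-state rewrite: parse the hour once, then bump an
--     integer until its decimal reverse drops below 60, instead of recursing on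
--     re-parsed strings)"""
--     if int(small_value[0]) >= 6:
--         m = int(hour) + 1
--         if m == 24:
--             return "0", "0"
--         while int(str(m)[::-1]) >= 60:
--             m += 1
--         return str(m), str(m)[::-1]
--     if hour == "24":
--         return "0", "0"
--     return hour, small_value
-- ===== Notes on version B (the rewrite author's own statement) =====
-- stated objective: alternative
-- what changed: A recurses on a (string,string) state, re-parsing the reversed hour string and its first character at every level; B parses the hour once and runs a single integer-state loop that bumps m until the decimal reverse of m drops below 60, emitting the strings only at the end.
import Mathlib
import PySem

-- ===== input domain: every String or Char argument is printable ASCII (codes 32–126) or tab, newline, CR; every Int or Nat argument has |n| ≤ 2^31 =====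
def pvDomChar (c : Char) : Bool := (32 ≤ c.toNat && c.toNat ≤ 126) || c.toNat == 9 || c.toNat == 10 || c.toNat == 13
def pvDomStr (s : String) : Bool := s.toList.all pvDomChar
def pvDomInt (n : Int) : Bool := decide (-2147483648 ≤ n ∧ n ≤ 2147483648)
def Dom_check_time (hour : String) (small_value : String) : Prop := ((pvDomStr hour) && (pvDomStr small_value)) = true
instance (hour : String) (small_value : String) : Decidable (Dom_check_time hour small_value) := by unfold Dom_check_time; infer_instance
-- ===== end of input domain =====

-- B replaces A's (string,string)-state recursion (which re-parses the reversed hour string and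
-- its first character at every level) by one integer-state loop: parse the hour once, bump m
-- until the decimal reverse of m drops below 60, and emit the strings only at the end.
-- Equivalence is about the return value on Pre_ (exactly the inputs where A returns normally:
-- elsewhere A raises ValueError/IndexError or recurses forever).

-- Python s[::-1] (full reverse slice) on strings
def revPy (s : String) : String := String.ofList s.toList.reverse

-- ===== PORT A =====
-- fuel only makes the (otherwise possibly infinite) recursion total; it is never exhausted under Pre_
def check_time_go (fuel : Nat) (hour : String) (small_value : String) : String × String :=
  match fuel with
  | 0 => (hour, small_value)                          -- fuel exhausted: unreachable under Pre_
  | f + 1 =>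
    match PySem.Str.pyGet? small_value 0 with
    | none => (hour, small_value)                     -- IndexError: excluded by Pre_
    | some c =>
      match PySem.Int.ofChars? [c] with               -- int(small_value[0])
      | none => (hour, small_value)                   -- ValueError: excluded by Pre_
      | some d =>
        match (if 6 ≤ d then
                 match PySem.Int.ofStr? hour with     -- int(hour)
                 | none => none
                 | some n => some (PySem.Int.toStr (n + 1), revPy (PySem.Int.toStr (n + 1)))
               else some (hour, small_value)) with
        | none => (hour, small_value)                 -- ValueError: excluded by Pre_
        | some st =>
          let p := if st.1 = "24" then ("0", revPy "0") else st
          match PySem.Int.ofStr? p.2 with             -- int(small_value)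
          | none => p                                 -- ValueError: excluded by Pre_
          | some v => if 60 ≤ v then check_time_go f p.1 p.2 else p

def check_time (hour : String) (small_value : String) : String × String :=
  check_time_go 20 hour small_value

-- ===== PORT B =====
-- the 'while int(str(m)[::-1]) >= 60: m += 1' loop of Source B (fuel only for totality;
-- under Pre_ the loop runs at most 10 steps, so fuel 20 is never exhausted)
def altLoop (fuel : Nat) (m : Int) : Int :=
  match fuel with
  | 0 => m
  | f + 1 =>
    match PySem.Int.ofStr? (revPy (PySem.Int.toStr m)) with
    | none => m                                       -- int() ValueError: unreachable under Pre_
    | some v => if 60 ≤ v then altLoop f (m + 1) else m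

def check_time_alt (hour : String) (small_value : String) : String × String :=
  match PySem.Str.pyGet? small_value 0 with
  | none => (hour, small_value)                       -- IndexError
  | some c =>
    match PySem.Int.ofChars? [c] with                 -- int(small_value[0])
    | none => (hour, small_value)                     -- ValueError
    | some d =>
      if 6 ≤ d then
        match PySem.Int.ofStr? hour with              -- m = int(hour) + 1
        | none => (hour, small_value)                 -- ValueError
        | some n =>
          if n + 1 = 24 then ("0", "0")
          else
            let m := altLoop 20 (n + 1)
            (PySem.Int.toStr m, revPy (PySem.Int.toStr m))
      else if hour = "24" then ("0", "0")
      else (hour, small_value)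

-- ===== PRECONDITION & SPEC =====
-- helper values on the integer hour state m (all computed from the input alone):
def revVal? (m : Int) : Option Int := PySem.Int.ofStr? (revPy (PySem.Int.toStr m))   -- int(str(m)[::-1])
def revGE60 (m : Int) : Bool := match revVal? m with | some v => decide (60 ≤ v) | none => false
def revLT60 (m : Int) : Bool := match revVal? m with | some v => decide (v < 60) | none => false
def headDigGE6 (m : Int) : Bool :=                     -- int(str(m)[::-1][0]) >= 6
  match PySem.Str.pyGet? (revPy (PySem.Int.toStr m)) 0 with
  | some c => (match PySem.Int.ofChars? [c] with | some d => decide (6 ≤ d) | none => false)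
  | none => false
def selfParse (m : Int) : Bool := PySem.Int.ofStr? (PySem.Int.toStr m) == some m     -- int(str(m)) == m

-- the bumped hour m = int(hour)+1 walks m, m+1, … while the reverse stays ≥ 60 and the last
-- digit stays ≥ 6; A terminates iff that walk reaches a reverse < 60 (always within 10 steps)
def chainOK (m : Int) : Bool :=
  (List.range 11).any (fun j =>
    ((List.range (j + 1)).all (fun i => selfParse (m + (i : Int)))) &&
    ((List.range j).all (fun i => revGE60 (m + (i : Int)) && headDigGE6 (m + (i : Int)))) &&
    revLT60 (m + (j : Int)))

-- Pre_ = exactly the inputs on which A returns normally: small_value starts with a digit; if that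
-- digit is ≥ 6 the hour must parse and the bumped hour chain must terminate (otherwise A raises
-- ValueError or recurses forever); if < 6, either hour == "24" or small_value parses below 60.
def Pre_check_time (hour : String) (small_value : String) : Prop :=
  (match PySem.Str.pyGet? small_value 0 with
   | none => false
   | some c =>
     match PySem.Int.ofChars? [c] with
     | none => false
     | some d =>
       if 6 ≤ d then
         match PySem.Int.ofStr? hour with
         | none => false
         | some n => decide (n + 1 = 24) || chainOK (n + 1)
       else decide (hour = "24") ||
            (match PySem.Int.ofStr? small_value with
             | some v => decide (v < 60)
             | none => false)) = true
instance (hour : String) (small_value : String) : Decidable (Pre_check_time hour small_value) := by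
  unfold Pre_check_time; infer_instance

def pvWitness_check_time : String × String := ("9", "65")

def Spec_check_time (hour : String) (small_value : String) (out : String × String) : Prop := out = check_time_alt hour small_value
instance (hour : String) (small_value : String) (out : String × String) : Decidable (Spec_check_time hour small_value out) := by unfold Spec_check_time; infer_instance

-- ===== CLAIM (what is proved, stated in full; the proofs are below) =====
def Claim_equal_check_time : Prop := ∀ (hour : String) (small_value : String), Dom_check_time hour small_value → Pre_check_time hour small_value → Spec_check_time hour small_value (check_time hour small_value)

-- ===== LEMMAS AND PROOFS =====

theorem altLoop_eq (j : Nat) : ∀ (m : Int) (f : Nat), j < f →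
    (∀ i : Nat, i < j → revGE60 (m + i) = true) →
    revLT60 (m + j) = true →
    altLoop f m = m + j := by
  induction j with
  | zero =>
    intro m f hf hge hlt
    match f, hf with
    | f + 1, _ =>
      simp only [Nat.cast_zero, add_zero] at hlt
      unfold altLoop
      unfold revLT60 revVal? at hlt
      rcases hv : PySem.Int.ofStr? (revPy (PySem.Int.toStr m)) with _ | v <;> rw [hv] at hlt
      · exact absurd hlt (by simp)
      · simp only [decide_eq_true_eq] at hlt
        simp [not_le.mpr hlt]
  | succ j ih =>
    intro m f hf hge hlt
    match f, hf with
    | f + 1, hf =>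
      have h0 := hge 0 (Nat.succ_pos j)
      simp only [Nat.cast_zero, add_zero] at h0
      unfold revGE60 revVal? at h0
      rcases hv : PySem.Int.ofStr? (revPy (PySem.Int.toStr m)) with _ | v <;> rw [hv] at h0
      · exact absurd h0 (by simp)
      · simp only [decide_eq_true_eq] at h0
        unfold altLoop
        rw [hv]
        simp only [if_pos h0]
        have := ih (m + 1) f (by omega)
          (fun i hi => by
            have := hge (i + 1) (by omega)
            have h := hge (i + 1) (by omega)
            push_cast at h
            rw [show m + 1 + (i : Int) = m + ((i : Int) + 1) by ring]
            exact h)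
          (by
            push_cast at hlt
            rw [show m + 1 + (j : Int) = m + ((j : Int) + 1) by ring]
            exact hlt)
        rw [this]
        push_cast
        ring
theorem selfParse_eq (m : Int) (h : selfParse m = true) :
    PySem.Int.ofStr? (PySem.Int.toStr m) = some m := by
  simpa [selfParse] using h

theorem toStr_ne_24 (m : Int) (h : selfParse m = true) (hm : m ≠ 24) :
    PySem.Int.toStr m ≠ "24" := by
  intro he
  have h' := selfParse_eq m h
  rw [he] at h'
  have h24 : PySem.Int.ofStr? "24" = some (24 : Int) := by decide
  rw [h24] at h'
  exact hm (by simpa using h'.symm)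

theorem headDigGE6_elim (m : Int) (h : headDigGE6 m = true) :
    ∃ c d, PySem.Str.pyGet? (revPy (PySem.Int.toStr m)) 0 = some c ∧
      PySem.Int.ofChars? [c] = some d ∧ 6 ≤ d := by
  unfold headDigGE6 at h
  split at h
  · next c hc =>
    split at h
    · next d hd => exact ⟨c, d, hc, hd, by simpa using h⟩
    · exact absurd h (by simp)
  · exact absurd h (by simp)

theorem ne_23_of_headDig (m : Int) (h : headDigGE6 m = true) : m ≠ 23 := by
  intro hm; rw [hm] at h; exact absurd h (by decide)

theorem go_entry (j : Nat) : ∀ (m : Int) (f : Nat), j < f →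
    (∀ i : Nat, i ≤ j → headDigGE6 (m + i) = true) →
    (∀ i : Nat, i ≤ j + 1 → selfParse (m + i) = true) →
    (∀ i : Nat, 1 ≤ i → i ≤ j → revGE60 (m + i) = true) →
    revLT60 (m + ((j : Int) + 1)) = true →
    check_time_go f (PySem.Int.toStr m) (revPy (PySem.Int.toStr m)) =
      (PySem.Int.toStr (m + ((j : Int) + 1)), revPy (PySem.Int.toStr (m + ((j : Int) + 1)))) := by
  induction j with
  | zero =>
    intro m f hf hd hsp hge hlt
    match f, hf with
    | f + 1, _ =>
      obtain ⟨c, d, hc, hcd, h6⟩ := headDigGE6_elim m (by simpa using hd 0 (le_refl 0))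
      have hsp0 : PySem.Int.ofStr? (PySem.Int.toStr m) = some m :=
        selfParse_eq m (by simpa using hsp 0 (by omega))
      have hne : PySem.Int.toStr (m + 1) ≠ "24" := by
        apply toStr_ne_24 (m + 1) (by simpa using hsp 1 (by omega))
        have := ne_23_of_headDig m (by simpa using hd 0 (le_refl 0))
        omega
      unfold check_time_go
      simp only [hc, hcd, if_pos h6, hsp0]
      simp only [if_neg hne]
      unfold revLT60 revVal? at hlt
      simp only [Nat.cast_zero, zero_add] at hlt
      rcases hv : PySem.Int.ofStr? (revPy (PySem.Int.toStr (m + 1))) with _ | v <;> rw [hv] at hlt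
      · exact absurd hlt (by simp)
      · simp only [decide_eq_true_eq] at hlt
        simp [not_le.mpr hlt]
  | succ j ih =>
    intro m f hf hd hsp hge hlt
    match f, hf with
    | f + 1, hf =>
      obtain ⟨c, d, hc, hcd, h6⟩ := headDigGE6_elim m (by simpa using hd 0 (by omega))
      have hsp0 : PySem.Int.ofStr? (PySem.Int.toStr m) = some m :=
        selfParse_eq m (by simpa using hsp 0 (by omega))
      have hne : PySem.Int.toStr (m + 1) ≠ "24" := by
        apply toStr_ne_24 (m + 1) (by simpa using hsp 1 (by omega))
        have := ne_23_of_headDig m (by simpa using hd 0 (by omega))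
        omega
      have hge1 : revGE60 (m + 1) = true := by simpa using hge 1 (by omega) (by omega)
      unfold revGE60 revVal? at hge1
      rcases hv : PySem.Int.ofStr? (revPy (PySem.Int.toStr (m + 1))) with _ | v <;> rw [hv] at hge1
      · exact absurd hge1 (by simp)
      · simp only [decide_eq_true_eq] at hge1
        unfold check_time_go
        simp only [hc, hcd, if_pos h6, hsp0]
        simp only [if_neg hne, hv, if_pos hge1]
        have := ih (m + 1) f (by omega)
          (fun i hi => by
            have h := hd (i + 1) (by omega); push_cast at h
            rw [show m + 1 + (i : Int) = m + ((i : Int) + 1) by ring]; exact h)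
          (fun i hi => by
            have h := hsp (i + 1) (by omega); push_cast at h
            rw [show m + 1 + (i : Int) = m + ((i : Int) + 1) by ring]; exact h)
          (fun i h1 hi => by
            have h := hge (i + 1) (by omega) (by omega); push_cast at h
            rw [show m + 1 + (i : Int) = m + ((i : Int) + 1) by ring]; exact h)
          (by
            push_cast at hlt
            rw [show m + 1 + ((j : Int) + 1) = m + ((j : Int) + 1 + 1) by ring]; exact hlt)
        rw [this, show m + 1 + ((j : Int) + 1) = m + (((j+1 : Nat) : Int) + 1) by push_cast; ring]

theorem revLT60_elim (m : Int) (h : revLT60 m = true) :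
    ∃ v, PySem.Int.ofStr? (revPy (PySem.Int.toStr m)) = some v ∧ v < 60 := by
  unfold revLT60 revVal? at h
  split at h
  · next v hv => exact ⟨v, hv, by simpa using h⟩
  · exact absurd h (by simp)

theorem revGE60_elim (m : Int) (h : revGE60 m = true) :
    ∃ v, PySem.Int.ofStr? (revPy (PySem.Int.toStr m)) = some v ∧ 60 ≤ v := by
  unfold revGE60 revVal? at h
  split at h
  · next v hv => exact ⟨v, hv, by simpa using h⟩
  · exact absurd h (by simp)

theorem chainOK_elim (m : Int) (h : chainOK m = true) :
    ∃ j : Nat, j < 11 ∧ (∀ i : Nat, i ≤ j → selfParse (m + i) = true) ∧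
      (∀ i : Nat, i < j → revGE60 (m + i) = true ∧ headDigGE6 (m + i) = true) ∧
      revLT60 (m + j) = true := by
  unfold chainOK at h
  rw [List.any_eq_true] at h
  obtain ⟨j, hj, hbody⟩ := h
  rw [List.mem_range] at hj
  simp only [Bool.and_eq_true, List.all_eq_true, List.mem_range] at hbody
  obtain ⟨⟨hsp, hcd⟩, hlt⟩ := hbody
  exact ⟨j, hj, fun i hi => hsp i (by omega), fun i hi => hcd i hi, hlt⟩

theorem go_succ (f : Nat) (hour small_value : String) :
    check_time_go (f + 1) hour small_value =
    (match PySem.Str.pyGet? small_value 0 with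
    | none => (hour, small_value)
    | some c =>
      match PySem.Int.ofChars? [c] with
      | none => (hour, small_value)
      | some d =>
        match (if 6 ≤ d then
                 match PySem.Int.ofStr? hour with
                 | none => none
                 | some n => some (PySem.Int.toStr (n + 1), revPy (PySem.Int.toStr (n + 1)))
               else some (hour, small_value)) with
        | none => (hour, small_value)
        | some st =>
          let p := if st.1 = "24" then ("0", revPy "0") else st
          match PySem.Int.ofStr? p.2 with
          | none => p
          | some v => if 60 ≤ v then check_time_go f p.1 p.2 else p) := rfl

-- ===== VERDICT (by name: the statement is the Claim_ definition above) =====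
theorem check_time_spec : Claim_equal_check_time := by
  intro hour sv _ hPre
  unfold Spec_check_time check_time check_time_alt
  unfold Pre_check_time at hPre
  rw [show (20 : Nat) = 19 + 1 from rfl, go_succ]
  split at hPre
  · exact absurd hPre (by simp)
  · next c hc =>
    split at hPre
    · exact absurd hPre (by simp)
    · next d hcd =>
      by_cases h6 : 6 ≤ d
      · rw [if_pos h6] at hPre
        split at hPre
        · exact absurd hPre (by simp)
        · next n hn =>
          simp only [if_pos h6]
          by_cases h24 : n + 1 = 24
          · rw [h24]
            simp [show PySem.Int.toStr (24 : Int) = "24" from rfl,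
                  show revPy "0" = "0" from rfl,
                  show PySem.Int.ofStr? "0" = some (0 : Int) from by decide]
          · have hchain : chainOK (n + 1) = true := by
              rcases Bool.or_eq_true_iff.mp hPre with h | h
              · exact absurd (by simpa using h) h24
              · exact h
            obtain ⟨j, hj11, hsp, hcd', hlt⟩ := chainOK_elim (n + 1) hchain
            have hneS : PySem.Int.toStr (n + 1) ≠ "24" :=
              toStr_ne_24 (n + 1) (by simpa using hsp 0 (by omega)) h24
            have hB : altLoop 20 (n + 1) = (n + 1) + (j : Int) :=
              altLoop_eq j (n + 1) 20 (by omega) (fun i hi => (hcd' i hi).1) hlt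
            rw [if_neg h24, hB]
            simp only [if_neg hneS]
            rcases Nat.eq_zero_or_pos j with hj0 | hjpos
            · subst hj0
              simp only [Nat.cast_zero, add_zero] at hlt ⊢
              obtain ⟨v, hv, hvlt⟩ := revLT60_elim (n + 1) hlt
              simp [hv, not_le.mpr hvlt]
            · obtain ⟨j', rfl⟩ : ∃ j', j = j' + 1 := ⟨j - 1, by omega⟩
              obtain ⟨v, hv, hvge⟩ := revGE60_elim (n + 1)
                (by simpa using (hcd' 0 (by omega)).1)
              simp only [hv, if_pos hvge]
              have := go_entry j' (n + 1) 19 (by omega)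
                (fun i hi => (hcd' i (by omega)).2)
                (fun i hi => hsp i (by omega))
                (fun i h1 hi => (hcd' i (by omega)).1)
                (by
                  rw [show n + 1 + ((j' : Int) + 1) = n + 1 + ((j' + 1 : Nat) : Int) by push_cast; ring]
                  exact hlt)
              rw [this, show n + 1 + ((j' : Int) + 1) = n + 1 + ((j' + 1 : Nat) : Int) by push_cast; ring]
      · rw [if_neg h6] at hPre
        simp only [if_neg h6]
        by_cases h24 : hour = "24"
        · simp [h24, show revPy "0" = "0" from rfl,
                show PySem.Int.ofStr? "0" = some (0 : Int) from by decide]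
        · simp only [decide_eq_false h24, Bool.false_or] at hPre
          split at hPre
          · next v hv =>
            simp only [if_neg h24, hv]
            simp [not_le.mpr (show v < 60 by simpa using hPre)]
          · exact absurd hPre (by simp)
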